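-- pv_equiv track=rewrite | github.com/Harito97/PythonAndScratch3Tutorial | ThiTinHocTre/Archived/2024_04_20/ChiTiet/ProblemA.py | process
-- ===== SOURCE A (Python) =====
-- def process(data:list[int]):
--     # result = [[data[0]]]
--     result = [data[0]]
--     # max_result = data[0]
--     max_result = result[-1]
--     final_result = []
--     for i in range(1, len(data)):
--         max_data = max(data[i:])    # có thể thêm thủ thuật ở đây để tính max_data 1 cách nhanh hơn việc dùng max(data[i:]) tuy nhiên đánh đổi là code dài hơn và tốn bộ nhớ hơn
--         if max_data > max_result:
--             # result[-1].append(data[i])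
--             if data[i] > max_result:
--                 result[-1] = data[i]
--                 max_result = data[i]
--         else:
--             # result.append([data[i]])
--             result.append(data[i])
--             max_result = data[i]
--     # ở đây result có 2 cách biểu diễn
--     # cách 1 là 1 mảng 2D -> dễ hiểu theo logic chuyển mọi phần tử từ data sang result -> tốn bộ nhớ và không cần thiết cho kết quả cuối cùng
--     # cách 2 là 1 mảng 1D chỉ lưu lại giá trị max của mỗi phân đoạn -> chính là kết quả cuối cùng
--     # nếu dùng cách biểu diễn 1 thì cần tạo thêm 1 mảng 1D nữa duyệt qua mảng result để lấy ra phần tử đuôi - cũng là phần tử max của mỗi phân đoạn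
--     # ngoài ra có thể thay thế biến max_result = result[-1] luôn (với cách biểu diễn result là mảng 1D) cho tiết kiệm bộ nhớ nhưng thầy giữ lại biến này để em đọc hiểu code
--     return result
-- ===== SOURCE B (Python) =====
-- def process(data: list[int]):
--     # O(n): suffix maxima in one backward pass, then a single forward loop.
--     suf = []
--     m = data[-1]
--     for x in reversed(data):
--         if x > m:
--             m = x
--         suf.append(m)
--     suf.reverse()
--     res = [data[0]]
--     cur = data[0]
--     for i in range(1, len(data)):
--         x = data[i]
--         if x > cur:
--             res[-1] = x
--             cur = x
--         elif suf[i] <= cur: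
--             res.append(x)
--             cur = x
--     return res
-- ===== Notes on version B (the rewrite author's own statement) =====
-- stated objective: faster
-- what changed: Replace the O(n) max(data[i:]) recomputed inside the loop by a suffix-maximum array built in one backward pass, and flatten A's nested conditional into a two-branch forward loop.
import Mathlib
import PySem

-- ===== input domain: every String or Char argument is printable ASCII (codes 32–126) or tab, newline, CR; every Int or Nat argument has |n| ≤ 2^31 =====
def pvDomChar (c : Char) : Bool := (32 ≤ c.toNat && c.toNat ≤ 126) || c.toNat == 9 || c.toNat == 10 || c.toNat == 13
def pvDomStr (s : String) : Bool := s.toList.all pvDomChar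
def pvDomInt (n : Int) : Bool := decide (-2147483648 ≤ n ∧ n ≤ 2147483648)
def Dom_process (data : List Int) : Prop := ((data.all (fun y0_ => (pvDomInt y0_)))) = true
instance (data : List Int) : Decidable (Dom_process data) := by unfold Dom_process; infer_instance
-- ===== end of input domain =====

-- B changes the algorithm: suffix maxima precomputed in one backward pass (O(n)) instead of
-- max(data[i:]) inside the loop (O(n^2)); return values proved equal on nonempty lists.

-- ===== PORT A =====
-- literal transliteration of A: result=[data[0]]; for i in range(1,len): max_data=max(data[i:]); …
def process (data : List Int) : List Int :=
  match data with
  | [] => []  -- Python raises IndexError on data[0]; excluded by Pre_process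
  | d0 :: _ =>
    let st := (PySem.List.pyRange 1 (data.length : Int) 1).foldl
      (fun (st : List Int × Int) i =>
        let result := st.1
        let maxr := st.2
        let maxData := (PySem.List.max? (PySem.List.slice data (some i) none) (fun y => y)).getD 0
        let x := PySem.List.pyGetD data i 0
        if maxData > maxr then
          if x > maxr then (result.dropLast ++ [x], x) else (result, maxr)
        else (result ++ [x], x)) ([d0], d0)
    st.1

-- ===== PORT B =====
-- literal transliteration of Source B: backward scan building suf, then one forward loop
def process_alt (data : List Int) : List Int :=
  match data with
  | [] => []  -- Python raises IndexError on data[-1]; excluded by Pre_process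
  | d0 :: _ =>
    let m0 := PySem.List.pyGetD data (-1) 0
    let p := data.reverse.foldl
      (fun (p : Int × List Int) x =>
        let m := if x > p.1 then x else p.1
        (m, p.2 ++ [m])) (m0, [])
    let suf := p.2.reverse
    let st := (PySem.List.pyRange 1 (data.length : Int) 1).foldl
      (fun (st : List Int × Int) i =>
        let x := PySem.List.pyGetD data i 0
        if x > st.2 then (st.1.dropLast ++ [x], x)
        else if PySem.List.pyGetD suf i 0 ≤ st.2 then (st.1 ++ [x], x)
        else st) ([d0], d0)
    st.1

-- ===== PRECONDITION & SPEC =====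
-- Pre_ excludes only the empty list, on which A (and B) raise IndexError.
def Pre_process (data : List Int) : Prop := data ≠ []
instance (data : List Int) : Decidable (Pre_process data) := by unfold Pre_process; infer_instance
def pvWitness_process : List Int := ([3, 1, 4, 1, 5])

def Spec_process (data : List Int) (out : List Int) : Prop := out = process_alt data
instance (data : List Int) (out : List Int) : Decidable (Spec_process data out) := by unfold Spec_process; infer_instance

-- ===== CLAIM (what is proved, stated in full; the proofs are below) =====
def Claim_equal_process : Prop := ∀ (data : List Int), Dom_process data → Pre_process data → Spec_process data (process data)

-- ===== LEMMAS AND PROOFS =====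

theorem foldl_max_comm (t : List Int) (a b : Int) :
    t.foldl max (max a b) = max a (t.foldl max b) := by
  induction t generalizing b with
  | nil => simp
  | cons x t ih =>
    simp only [List.foldl_cons]
    rw [max_assoc, ih]

theorem foldl_max_reverse (l : List Int) (a : Int) :
    l.reverse.foldl max a = l.foldl max a := by
  induction l generalizing a with
  | nil => rfl
  | cons x l ih =>
    simp only [List.reverse_cons, List.foldl_append, List.foldl_cons, List.foldl_nil]
    rw [ih, max_comm a x, foldl_max_comm l x a]
    exact max_comm _ _

theorem foldl_max_absorb (l : List Int) (a y : Int) (t : List Int)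
    (hl : l = y :: t) (ha : a ∈ l) : l.foldl max a = t.foldl max y := by
  subst hl
  have h1 := PySem.List.le_foldl_max t y
  have h2 := PySem.List.le_foldl_max (y :: t) a
  have top1 : ∀ z ∈ y :: t, z ≤ t.foldl max y := by
    intro z hz
    rcases List.mem_cons.mp hz with rfl | hz
    exacts [h1.1, h1.2 z hz]
  apply le_antisymm
  · rcases PySem.List.foldl_max_mem (y :: t) a with h | h
    · rw [h]; exact top1 a ha
    · exact top1 _ h
  · rcases PySem.List.foldl_max_mem t y with h | h
    · rw [h]; exact h2.2 y (by simp)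
    · exact h2.2 _ (by simp [h])

/-- the running-max prefix scan that B's backward loop computes -/
def scanMax : List Int → Int → List Int
  | [], _ => []
  | x :: xs, m => (if x > m then x else m) :: scanMax xs (if x > m then x else m)

theorem scanMax_length (l : List Int) (m : Int) : (scanMax l m).length = l.length := by
  induction l generalizing m with
  | nil => rfl
  | cons x xs ih => simp [scanMax, ih]

theorem foldl_scan_eq (l : List Int) (m : Int) (acc : List Int) :
    l.foldl (fun (p : Int × List Int) x =>
      let m := if x > p.1 then x else p.1
      (m, p.2 ++ [m])) (m, acc)
    = (l.foldl (fun a x => if x > a then x else a) m, acc ++ scanMax l m) := by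
  induction l generalizing m acc with
  | nil => simp [scanMax]
  | cons x xs ih => simp [scanMax, ih]

theorem scanMax_getElem (l : List Int) (m : Int) (j : Nat) (h : j < l.length) :
    (scanMax l m)[j]'(by rw [scanMax_length]; exact h) = (l.take (j + 1)).foldl max m := by
  induction l generalizing m j with
  | nil => simp at h
  | cons x xs ih =>
    cases j with
    | zero => simp [scanMax, max_comm]; split <;> omega
    | succ j =>
      simp only [scanMax, List.getElem_cons_succ, List.take_succ_cons, List.foldl_cons]
      rw [ih _ _ (by simpa using h)]
      congr 1
      simp [max_comm]; split <;> omega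

theorem maxData_eq (data : List Int) (i : Int) (h1 : 1 ≤ i) (h2 : i < (data.length : Int)) :
    (PySem.List.max? (PySem.List.slice data (some i) none) (fun y => y)).getD 0
      = (data.drop i.toNat).foldl max (PySem.List.pyGetD data i 0) := by
  have hj : i.toNat < data.length := by omega
  rw [PySem.List.slice_from data (by omega), PySem.List.pyGetD_eq_getElem data 0 (by omega) h2,
      List.drop_eq_getElem_cons hj, PySem.List.max?_id_cons]
  rw [Option.getD_some, List.foldl_cons, max_self]

theorem sufMax_getD (data : List Int) (h : data ≠ []) (i : Int) (h1 : 1 ≤ i)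
    (h2 : i < (data.length : Int)) :
    PySem.List.pyGetD ((scanMax data.reverse (PySem.List.pyGetD data (-1) 0)).reverse) i 0
      = (data.drop i.toNat).foldl max (PySem.List.pyGetD data i 0) := by
  have hj : i.toNat < data.length := by omega
  have hlen : ((scanMax data.reverse (PySem.List.pyGetD data (-1) 0)).reverse).length
      = data.length := by
    simp [scanMax_length]
  rw [PySem.List.pyGetD_eq_getElem _ 0 (by omega) (by rw [hlen]; exact h2),
      List.getElem_reverse, PySem.List.pyGetD_eq_getElem data 0 (by omega) h2]
  have hidx : (scanMax data.reverse (PySem.List.pyGetD data (-1) 0)).length - 1 - i.toNat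
      < data.reverse.length := by
    rw [scanMax_length, List.length_reverse]; omega
  rw [scanMax_getElem _ _ _ hidx]
  have hcount : (scanMax data.reverse (PySem.List.pyGetD data (-1) 0)).length - 1 - i.toNat + 1
      = data.length - i.toNat := by
    rw [scanMax_length, List.length_reverse]; omega
  rw [hcount, ← List.reverse_drop, foldl_max_reverse]
  have hm0 : PySem.List.pyGetD data (-1) 0 = data.getLast h := PySem.List.pyGetD_neg_one data 0 h
  have hmem : data.getLast h ∈ data.drop i.toNat := by
    have hne : data.drop i.toNat ≠ [] := by simp; omega
    have := List.getLast_mem hne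
    rwa [List.getLast_drop] at this
  rw [hm0, foldl_max_absorb _ _ _ _ (List.drop_eq_getElem_cons hj) hmem]
  conv_rhs => rw [List.drop_eq_getElem_cons hj]
  rw [List.foldl_cons, max_self]

theorem process_spec' (data : List Int) (h : data ≠ []) :
    process data = process_alt data := by
  obtain ⟨d0, rest, rfl⟩ := List.exists_cons_of_ne_nil h
  simp only [process, process_alt, foldl_scan_eq, List.nil_append]
  congr 1
  apply PySem.List.foldl_congr_mem
  intro acc i hi
  obtain ⟨hi1, hi2⟩ := PySem.List.mem_pyRange_one.mp hi
  simp only [maxData_eq _ i hi1 hi2, sufMax_getD _ h i hi1 hi2]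
  set y := PySem.List.pyGetD (d0 :: rest) i 0 with hy
  set M := ((d0 :: rest).drop i.toNat).foldl max y with hM
  have hyM : y ≤ M := (PySem.List.le_foldl_max _ y).1
  by_cases hxy : y > acc.2
  · have hMgt : M > acc.2 := lt_of_lt_of_le hxy hyM
    simp [hMgt, hxy]
  · by_cases hMgt : M > acc.2
    · simp [hMgt, hxy, not_le.mpr hMgt]
    · simp [hMgt, hxy, not_lt.mp hMgt]

-- ===== VERDICT (by name: the statement is the Claim_ definition above) =====
theorem process_spec : Claim_equal_process := by
  intro data _ hpre
  exact process_spec' data hpre
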